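-- pv_equiv track=rewrite | github.com/apollokit/better_dictate | backend/commands.py | format_case
-- ===== SOURCE A (Python) =====
-- def format_case(text: str, case: str) -> str: #pylint: disable=too-many-return-statements
--     """Format a list of string tokens in the given case
--
--     Args:
--         text: string of words separated by spaces
--         case: the case in which to format
--
--     Returns:
--         the formatted string
--     """
--     tokens = text.split()
--     # the raw tokens look like: 'bay laugh anguish hannover'
--     # returns 'BAY LAUGH ANGUISH HANNOVER'
--     if case == 'upper':
--         return ' '.join([token.upper() for token in tokens])
--
--     # the raw tokens look like: 'bay laugh anguish hannover'
--     # returns 'bay laugh anguish hannover'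
--     elif case == 'lower':
--         return ' '.join([token.lower() for token in tokens])
--
--     # the raw tokens look like: 'bay laugh anguish hannover'
--     # returns 'Bay Laugh Anguish Hannover'
--     elif case == 'title':
--         return ' '.join([token.capitalize() for token in tokens])
--
--     # the raw tokens look like: 'bay laugh anguish hannover'
--     # returns 'BayLaughAnguishHannover'
--     elif case == 'pascal':
--         return ''.join([token.capitalize() for token in tokens])
--
--     # the raw tokens look like: 'bay laugh anguish hannover'
--     # returns 'bay_laugh_anguish_hannover'
--     elif case == 'snake':
--         return '_'.join(tokens)
--
--     # the raw tokens look like: 'bay laugh anguish hannover'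
--     # returns 'BAY_LAUGH_ANGUISH_HANNOVER'
--     elif case == 'screaming snake':
--         return '_'.join([token.upper() for token in tokens])
--
--     # the raw tokens look like: 'bay laugh anguish hannover'
--     # returns 'bayLaughAnguishHannover'
--     elif case == 'camel':
--         return ''.join(
--             [tokens[0].lower()] + [token.capitalize() for token in tokens[1:]])
--
--     # the raw tokens look like: 'bay laugh anguish hannover'
--     # returns 'BLAH'
--     elif case == 'acronym':
--         first_letters = [token[0].upper() for token in tokens]
--         return ''.join(first_letters)
--
--     # the raw tokens look like: 'blah' or 'b l a h'
--     # returns 'blah'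
--     elif case == 'lower letters':
--         joined = ''.join(tokens)
--         joined = joined.replace(' ','')
--         return joined.lower()
--
--     # the raw tokens look like: 'blah' or 'b l a h'
--     # returns 'BLAH'
--     elif case == 'upper letters':
--         joined = ''.join(tokens)
--         joined = joined.replace(' ','')
--         return joined.upper()
--
--     # the raw tokens look like: 'blah' or 'b l a h'
--     # returns 'Blah'
--     elif case == 'name letters':
--         joined = ''.join(tokens)
--         joined = joined.replace(' ','')
--         return joined.capitalize()
--
--     else:
--         raise NotImplementedError
-- ===== SOURCE B (Python) =====
-- # Single character-level scan: formats the text in one pass over its characters,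
-- # tracking word index w and in-word char index j; never builds the token list.
--
-- def _piece(case, w, j, ch):
--     if case in ('upper', 'screaming snake', 'upper letters'):
--         return ch.upper()
--     if case in ('lower', 'lower letters'):
--         return ch.lower()
--     if case in ('title', 'pascal'):
--         return ch.upper() if j == 0 else ch.lower()
--     if case == 'snake':
--         return ch
--     if case == 'camel':
--         return ch.lower() if w == 0 else (ch.upper() if j == 0 else ch.lower())
--     if case == 'acronym':
--         return ch.upper() if j == 0 else ''
--     return ch.upper() if w == 0 and j == 0 else ch.lower()  # name letters
--
-- def format_case(text: str, case: str) -> str: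
--     known = ('upper', 'lower', 'title', 'pascal', 'snake', 'screaming snake',
--              'camel', 'acronym', 'lower letters', 'upper letters', 'name letters')
--     if case not in known:
--         raise NotImplementedError
--     sep = (' ' if case in ('upper', 'lower', 'title')
--            else '_' if case in ('snake', 'screaming snake') else '')
--     out = []
--     in_word = False
--     w = 0  # index of the word currently scanned
--     j = 0  # index of the char within its word
--     for ch in text:
--         if ch.isspace():
--             if in_word:
--                 w += 1
--             in_word = False
--             continue
--         j = j + 1 if in_word else 0
--         if not in_word and w > 0:
--             out.append(sep)
--         in_word = True
--         out.append(_piece(case, w, j, ch))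
--     return ''.join(out)
-- ===== Notes on version B (the rewrite author's own statement) =====
-- stated objective: alternative
-- what changed: Replaces A's split-into-tokens / per-token comprehension / join pipeline by a single character-level scan over the raw text that tracks a word index and an in-word char index and emits the separator and each transformed character directly, never materialising the token list.
-- crash fix: On case 'camel' with a text containing no tokens (empty or all-whitespace), A raises IndexError on tokens[0] while B's character scan naturally returns the empty string. — e.g. on format_case("", "camel"): A raises IndexError, B returns ""
import Mathlib
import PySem

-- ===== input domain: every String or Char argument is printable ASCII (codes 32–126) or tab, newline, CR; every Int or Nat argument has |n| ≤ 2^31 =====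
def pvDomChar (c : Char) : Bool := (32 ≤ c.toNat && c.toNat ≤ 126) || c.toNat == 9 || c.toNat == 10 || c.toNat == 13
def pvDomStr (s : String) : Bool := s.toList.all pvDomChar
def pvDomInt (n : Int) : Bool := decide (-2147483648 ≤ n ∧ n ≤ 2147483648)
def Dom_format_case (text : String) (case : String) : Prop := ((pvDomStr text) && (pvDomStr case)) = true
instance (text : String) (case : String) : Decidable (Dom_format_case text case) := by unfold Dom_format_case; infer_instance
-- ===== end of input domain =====

-- B replaces A's split/per-token-comprehension/join pipeline by a single character-level
-- scan of the raw text (word index w, in-word char index j, emitting separator and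
-- transformed chars directly); objective: alternative. Same values wherever A returns (Pre_).

-- shared helper: Python str.capitalize() (first char title-cased, rest lowered; exact on ASCII)
def pvCapChars : List Char → List Char
  | [] => []
  | c :: cs => PySem.Chars.upperChar c :: PySem.Chars.lower cs
def pyCapitalize (s : String) : String := String.ofList (pvCapChars s.toList)

-- Python token[0].upper() for a token (none branch = IndexError, unreachable for split() tokens)
def pyFirstUpper (t : String) : String :=
  match PySem.List.pyGet? t.toList 0 with
  | some c => String.ofList [PySem.Chars.upperChar c]
  | none => ""

-- ===== PORT A =====
def format_case (text : String) (case : String) : String :=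
  let tokens := PySem.Str.split₀ text
  if case == "upper" then PySem.Str.join " " (tokens.map PySem.Str.upper)
  else if case == "lower" then PySem.Str.join " " (tokens.map PySem.Str.lower)
  else if case == "title" then PySem.Str.join " " (tokens.map pyCapitalize)
  else if case == "pascal" then PySem.Str.join "" (tokens.map pyCapitalize)
  else if case == "snake" then PySem.Str.join "_" tokens
  else if case == "screaming snake" then PySem.Str.join "_" (tokens.map PySem.Str.upper)
  else if case == "camel" then
    match PySem.List.pyGet? tokens 0 with
    | some t0 =>
        PySem.Str.join "" (PySem.Str.lower t0 :: (PySem.List.slice tokens (some 1) none).map pyCapitalize)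
    | none => ""  -- Python raises IndexError here (tokens[0] on empty list); excluded by Pre_
  else if case == "acronym" then PySem.Str.join "" (tokens.map pyFirstUpper)
  else if case == "lower letters" then
    PySem.Str.lower (PySem.Str.replace (PySem.Str.join "" tokens) " " "")
  else if case == "upper letters" then
    PySem.Str.upper (PySem.Str.replace (PySem.Str.join "" tokens) " " "")
  else if case == "name letters" then
    pyCapitalize (PySem.Str.replace (PySem.Str.join "" tokens) " " "")
  else ""  -- Python raises NotImplementedError; excluded by Pre_

-- ===== PORT B =====
-- _piece(case, w, j, ch): the characters to emit for ch, the j-th char of word w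
def fcPiece (case : String) (w j : Nat) (c : Char) : List Char :=
  if case == "upper" || case == "screaming snake" || case == "upper letters" then
    [PySem.Chars.upperChar c]
  else if case == "lower" || case == "lower letters" then
    [PySem.Chars.lowerChar c]
  else if case == "title" || case == "pascal" then
    if j == 0 then [PySem.Chars.upperChar c] else [PySem.Chars.lowerChar c]
  else if case == "snake" then [c]
  else if case == "camel" then
    if w == 0 then [PySem.Chars.lowerChar c]
    else if j == 0 then [PySem.Chars.upperChar c] else [PySem.Chars.lowerChar c]
  else if case == "acronym" then
    if j == 0 then [PySem.Chars.upperChar c] else []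
  else  -- name letters
    if w == 0 && j == 0 then [PySem.Chars.upperChar c] else [PySem.Chars.lowerChar c]

-- the for-loop over the characters: state (in_word, w, j), output emitted in order
def fcScan (sep : List Char) (tr : Nat → Nat → Char → List Char) :
    List Char → Bool → Nat → Nat → List Char
  | [], _, _, _ => []
  | c :: rest, inWord, w, j =>
    if PySem.Chars.isspace c then
      fcScan sep tr rest false (if inWord then w + 1 else w) j
    else
      let j' := if inWord then j + 1 else 0
      (if !inWord && decide (0 < w) then sep else []) ++ tr w j' c ++
        fcScan sep tr rest true w j'

def format_case_alt (text : String) (case : String) : String :=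
  if ["upper", "lower", "title", "pascal", "snake", "screaming snake", "camel",
      "acronym", "lower letters", "upper letters", "name letters"].contains case then
    let sep : List Char :=
      if ["upper", "lower", "title"].contains case then [' ']
      else if ["snake", "screaming snake"].contains case then ['_'] else []
    String.ofList (fcScan sep (fcPiece case) text.toList false 0 0)
  else ""  -- Python raises NotImplementedError; excluded by Pre_

-- ===== PRECONDITION & SPEC =====
-- Pre_ excludes exactly the inputs on which the Python A raises: an unknown case
-- (NotImplementedError) and 'camel' on a text with no tokens (IndexError on tokens[0]).
def Pre_format_case (text : String) (case : String) : Prop :=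
  case ∈ (["upper", "lower", "title", "pascal", "snake", "screaming snake", "camel",
           "acronym", "lower letters", "upper letters", "name letters"] : List String)
  ∧ (case = "camel" → PySem.Str.split₀ text ≠ [])
instance (text : String) (case : String) : Decidable (Pre_format_case text case) := by
  unfold Pre_format_case; infer_instance

def pvWitness_format_case : String × String := ("bay laugh anguish hannover", "camel")

-- On case 'camel' with a text containing no tokens, A raises IndexError on tokens[0]
-- while B's character scan naturally returns the empty string (format_case_raises below).
def Raises_format_case (text : String) (case : String) : Prop :=
  case = "camel" ∧ PySem.Str.split₀ text = []
instance (text : String) (case : String) : Decidable (Raises_format_case text case) := by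
  unfold Raises_format_case; infer_instance
def pvRaiseWitness_format_case : String × String := ("", "camel")
def pvRaiseWitnessOut_format_case : String := ""

def Spec_format_case (text : String) (case : String) (out : String) : Prop :=
  out = format_case_alt text case
instance (text : String) (case : String) (out : String) : Decidable (Spec_format_case text case out) := by
  unfold Spec_format_case; infer_instance

-- ===== CLAIM (what is proved, stated in full; the proofs are below) =====
def Claim_equal_format_case : Prop := ∀ (text : String) (case : String),
  Dom_format_case text case → Pre_format_case text case →
  Spec_format_case text case (format_case text case)

def Claim_raises_format_case : Prop :=
  (∀ (text : String) (case : String), Dom_format_case text case →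
      Raises_format_case text case → ¬ Pre_format_case text case)
  ∧ (Dom_format_case (pvRaiseWitness_format_case.1) (pvRaiseWitness_format_case.2)
     ∧ Raises_format_case (pvRaiseWitness_format_case.1) (pvRaiseWitness_format_case.2)
     ∧ format_case_alt (pvRaiseWitness_format_case.1) (pvRaiseWitness_format_case.2)
         = pvRaiseWitnessOut_format_case)

-- ===== LEMMAS AND PROOFS =====

-- proof-side spec of str.split() as a structural recursion word by word
def fcNotSp (c : Char) : Bool := !PySem.Chars.isspace c

def fcWords : List Char → List (List Char)
  | [] => []
  | c :: cs =>
    if PySem.Chars.isspace c then fcWords cs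
    else (c :: cs.takeWhile fcNotSp) :: fcWords (cs.dropWhile fcNotSp)
termination_by cs => cs.length
decreasing_by
  · simp
  · exact Nat.lt_succ_of_le (List.length_dropWhile_le _ _)

theorem fcWords_nil : fcWords [] = [] := by rw [fcWords]

theorem fcWords_cons_space (c : Char) (cs : List Char) (h : PySem.Chars.isspace c = true) :
    fcWords (c :: cs) = fcWords cs := by rw [fcWords, if_pos h]

theorem fcWords_cons_char (c : Char) (cs : List Char) (h : PySem.Chars.isspace c = false) :
    fcWords (c :: cs) = (c :: cs.takeWhile fcNotSp) :: fcWords (cs.dropWhile fcNotSp) := by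
  rw [fcWords, if_neg (by simp [h])]

-- split₀.go with accumulators, characterised against fcWords
theorem fc_go_spec : ∀ (cs cur : List Char) (acc : List (List Char)),
    PySem.Chars.split₀.go cs cur acc =
      acc.reverse ++ (if cur.isEmpty then fcWords cs
        else (cur.reverse ++ cs.takeWhile fcNotSp) :: fcWords (cs.dropWhile fcNotSp)) := by
  intro cs
  induction cs with
  | nil =>
    intro cur acc
    cases cur with
    | nil => simp [PySem.Chars.split₀.go, fcWords_nil]
    | cons c t => simp [PySem.Chars.split₀.go, fcWords_nil]
  | cons c rest ih =>
    intro cur acc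
    by_cases hsp : PySem.Chars.isspace c = true
    · cases cur with
      | nil =>
        simp only [PySem.Chars.split₀.go, hsp, if_true, List.isEmpty_nil]
        rw [ih [] acc, fcWords_cons_space c rest hsp]
        simp
      | cons d t =>
        simp only [PySem.Chars.split₀.go, hsp, if_true, List.isEmpty_cons]
        rw [ih [] ((d :: t).reverse :: acc)]
        simp [List.takeWhile, List.dropWhile, fcNotSp, hsp, fcWords_cons_space c rest hsp]
    · have hsp' : PySem.Chars.isspace c = false := by simpa using hsp
      simp only [PySem.Chars.split₀.go, hsp', Bool.false_eq_true, if_false]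
      rw [ih (c :: cur) acc]
      cases cur with
      | nil =>
        simp [fcWords_cons_char c rest hsp']
      | cons d t =>
        simp [List.takeWhile, List.dropWhile, fcNotSp, hsp']

theorem fc_split₀_eq_fcWords (cs : List Char) : PySem.Chars.split₀ cs = fcWords cs := by
  unfold PySem.Chars.split₀
  rw [fc_go_spec cs [] []]
  simp

-- what the scan emits for one word (j counts up) and for a word list (w counts up)
def fcEmitWord (tr : Nat → Nat → Char → List Char) (w : Nat) : Nat → List Char → List Char
  | _, [] => []
  | j, c :: cs => tr w j c ++ fcEmitWord tr w (j + 1) cs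

def fcEmitWords (sep : List Char) (tr : Nat → Nat → Char → List Char) :
    Nat → List (List Char) → List Char
  | _, [] => []
  | w, t :: ts => (if 0 < w then sep else []) ++ fcEmitWord tr w 0 t ++ fcEmitWords sep tr (w + 1) ts

-- the scan is fcEmitWords over the word decomposition
theorem fcScan_spec (sep : List Char) (tr : Nat → Nat → Char → List Char) : ∀ (cs : List Char),
    (∀ w j, fcScan sep tr cs false w j = fcEmitWords sep tr w (fcWords cs)) ∧
    (∀ w j, fcScan sep tr cs true w j =
      fcEmitWord tr w (j + 1) (cs.takeWhile fcNotSp) ++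
        fcEmitWords sep tr (w + 1) (fcWords (cs.dropWhile fcNotSp))) := by
  intro cs
  induction cs with
  | nil =>
    refine ⟨fun w j => ?_, fun w j => ?_⟩ <;> simp [fcScan, fcWords_nil, fcEmitWords, fcEmitWord]
  | cons c rest ih =>
    by_cases hsp : PySem.Chars.isspace c = true
    · refine ⟨fun w j => ?_, fun w j => ?_⟩
      · have e : fcScan sep tr (c :: rest) false w j = fcScan sep tr rest false w j := by
          simp [fcScan, hsp]
        rw [e, ih.1 w j, fcWords_cons_space c rest hsp]
      · have e : fcScan sep tr (c :: rest) true w j = fcScan sep tr rest false (w + 1) j := by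
          simp [fcScan, hsp]
        rw [e, ih.1 (w + 1) j]
        simp [fcNotSp, hsp, fcWords_cons_space c rest hsp, fcEmitWord]
    · have hsp' : PySem.Chars.isspace c = false := by simpa using hsp
      refine ⟨fun w j => ?_, fun w j => ?_⟩
      · have e : fcScan sep tr (c :: rest) false w j =
            (if 0 < w then sep else []) ++ tr w 0 c ++ fcScan sep tr rest true w 0 := by
          simp [fcScan, hsp']
        rw [e, ih.2 w 0, fcWords_cons_char c rest hsp']
        simp [fcEmitWords, fcEmitWord]
      · have e : fcScan sep tr (c :: rest) true w j =
            tr w (j + 1) c ++ fcScan sep tr rest true w (j + 1) := by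
          simp [fcScan, hsp']
        rw [e, ih.2 w (j + 1)]
        simp [fcNotSp, hsp', fcEmitWord]

-- join as head plus flat-mapped separator-prefixed tail
theorem fc_join_cons (sep x : List Char) (xs : List (List Char)) :
    PySem.Chars.join sep (x :: xs) = x ++ xs.flatMap (fun t => sep ++ t) := by
  induction xs generalizing x with
  | nil => simp [PySem.Chars.join_singleton]
  | cons y ys ih => rw [PySem.Chars.join_cons_cons, ih y]; simp

theorem fc_join_nil_flatten (ws : List (List Char)) :
    PySem.Chars.join [] ws = ws.flatten := by
  cases ws with
  | nil => simp [PySem.Chars.join_nil]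
  | cons x xs => rw [fc_join_cons]; simp

-- per-word emissions
theorem fcEmitWord_const (tr : Nat → Nat → Char → List Char) (w : Nat) (g : Char → Char)
    (h : ∀ j c, tr w j c = [g c]) : ∀ (t : List Char) (j : Nat), fcEmitWord tr w j t = t.map g := by
  intro t
  induction t with
  | nil => intro j; simp [fcEmitWord]
  | cons c cs ih => intro j; simp [fcEmitWord, h, ih]

theorem fcEmitWord_low (tr : Nat → Nat → Char → List Char) (w : Nat)
    (h : ∀ j c, 0 < j → tr w j c = [PySem.Chars.lowerChar c]) :
    ∀ (t : List Char) (j : Nat), 0 < j → fcEmitWord tr w j t = t.map PySem.Chars.lowerChar := by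
  intro t
  induction t with
  | nil => intro j _; simp [fcEmitWord]
  | cons c cs ih => intro j hj; simp [fcEmitWord, h j c hj, ih (j + 1) (by omega)]

theorem fcEmitWord_cap (tr : Nat → Nat → Char → List Char) (w : Nat)
    (h0 : ∀ c, tr w 0 c = [PySem.Chars.upperChar c])
    (hl : ∀ j c, 0 < j → tr w j c = [PySem.Chars.lowerChar c]) (t : List Char) :
    fcEmitWord tr w 0 t = pvCapChars t := by
  cases t with
  | nil => simp [fcEmitWord, pvCapChars]
  | cons c cs =>
    simp [fcEmitWord, h0, fcEmitWord_low tr w hl cs 1 (by omega), pvCapChars, PySem.Chars.lower]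

theorem fcEmitWord_skip (tr : Nat → Nat → Char → List Char) (w : Nat)
    (h : ∀ j c, 0 < j → tr w j c = []) :
    ∀ (t : List Char) (j : Nat), 0 < j → fcEmitWord tr w j t = [] := by
  intro t
  induction t with
  | nil => intro j _; simp [fcEmitWord]
  | cons c cs ih => intro j hj; simp [fcEmitWord, h j c hj, ih (j + 1) (by omega)]

-- word-list emission, for positive word index (every word gets the separator in front)
theorem fcEmitWords_pos (sep : List Char) (tr : Nat → Nat → Char → List Char)
    (f : List Char → List Char) (hf : ∀ w t, 0 < w → fcEmitWord tr w 0 t = f t) :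
    ∀ (ws : List (List Char)) (w : Nat), 0 < w →
      fcEmitWords sep tr w ws = ws.flatMap (fun t => sep ++ f t) := by
  intro ws
  induction ws with
  | nil => intro w _; simp [fcEmitWords]
  | cons t ts ih =>
    intro w hw
    rw [List.flatMap_cons]
    simp only [fcEmitWords, if_pos hw, hf w t hw, ih (w + 1) (by omega)]

-- word-list emission from index 0 when every word is transformed the same way
theorem fcEmitWords_zero (sep : List Char) (tr : Nat → Nat → Char → List Char)
    (f : List Char → List Char) (hf : ∀ w t, fcEmitWord tr w 0 t = f t) (ws : List (List Char)) :
    fcEmitWords sep tr 0 ws = PySem.Chars.join sep (ws.map f) := by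
  cases ws with
  | nil => simp [fcEmitWords, PySem.Chars.join_nil]
  | cons t ts =>
    simp only [fcEmitWords, Nat.lt_irrefl, hf 0 t,
      fcEmitWords_pos sep tr f (fun w t _ => hf w t) ts 1 (by omega), List.map_cons,
      fc_join_cons sep (f t) (ts.map f), List.flatMap_map]
    simp

-- words of a split have no whitespace and are nonempty
theorem fcWords_no_space (cs : List Char) :
    ∀ t ∈ fcWords cs, ∀ c ∈ t, PySem.Chars.isspace c = false := by
  induction cs using fcWords.induct with
  | case1 => simp [fcWords_nil]
  | case2 c cs h ih => rw [fcWords_cons_space c cs h]; exact ih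
  | case3 c cs h ih =>
    have h' : PySem.Chars.isspace c = false := by simpa using h
    rw [fcWords_cons_char c cs h']
    intro t ht d hd
    rcases List.mem_cons.mp ht with rfl | ht
    · rcases List.mem_cons.mp hd with rfl | hd
      · exact h'
      · have := List.mem_takeWhile_imp hd
        simpa [fcNotSp] using this
    · exact ih t ht d hd

theorem fcWords_ne_nil (cs : List Char) : ∀ t ∈ fcWords cs, t ≠ [] := by
  induction cs using fcWords.induct with
  | case1 => simp [fcWords_nil]
  | case2 c cs h ih => rw [fcWords_cons_space c cs h]; exact ih
  | case3 c cs h ih =>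
    have h' : PySem.Chars.isspace c = false := by simpa using h
    rw [fcWords_cons_char c cs h']
    intro t ht
    rcases List.mem_cons.mp ht with rfl | ht
    · simp
    · exact ih t ht

-- str.replace(s, ' ', '') is the identity on space-free strings
theorem fc_replace_go_noop : ∀ (fuel : Nat) (l acc : List Char), (∀ c ∈ l, c ≠ ' ') →
    PySem.Chars.replace.go [' '] [] fuel l acc = acc.reverse ++ l := by
  intro fuel
  induction fuel with
  | zero => intro l acc _; simp [PySem.Chars.replace.go]
  | succ n ih =>
    intro l acc h
    cases l with
    | nil => simp [PySem.Chars.replace.go]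
    | cons c t =>
      have hc : (' ' == c) = false := by
        rw [beq_eq_false_iff_ne]
        exact fun e => (h c (by simp)) e.symm
      simp only [PySem.Chars.replace.go, List.isPrefixOf, hc, Bool.false_and,
        Bool.false_eq_true, if_false]
      rw [ih t (c :: acc) (fun d hd => h d (by simp [hd]))]
      simp

theorem fc_replace_noop (s : List Char) (h : ∀ c ∈ s, c ≠ ' ') :
    PySem.Chars.replace s [' '] [] = s := by
  unfold PySem.Chars.replace
  simp only [List.isEmpty_cons, Bool.false_eq_true, if_false]
  rw [fc_replace_go_noop s.length s [] h]
  simp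

-- flattened words contain no space
theorem fc_flatten_no_space (cs : List Char) : ∀ c ∈ (fcWords cs).flatten, c ≠ ' ' := by
  intro c hc
  rcases List.mem_flatten.mp hc with ⟨t, ht, hct⟩
  intro hsp
  have := fcWords_no_space cs t ht c hct
  rw [hsp] at this
  simp [PySem.Chars.isspace] at this


-- the scan from the initial state, against a uniformly per-word-transformed join
theorem fc_scan_join (case : String) (sep : List Char) (f : List Char → List Char)
    (hf : ∀ w t, fcEmitWord (fcPiece case) w 0 t = f t) (cs : List Char) :
    fcScan sep (fcPiece case) cs false 0 0 =
      PySem.Chars.join sep ((PySem.Chars.split₀ cs).map f) := by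
  rw [(fcScan_spec sep (fcPiece case) cs).1 0 0, fcEmitWords_zero sep _ f hf,
      fc_split₀_eq_fcWords]

-- a positive in-word index, as a Bool test
theorem fc_pos_beq_false {j : Nat} (hj : 0 < j) : (j == 0) = false := by
  simpa using Nat.pos_iff_ne_zero.mp hj

theorem pv_case_upper (text : String) :
    format_case text "upper" = format_case_alt text "upper" := by
  apply String.toList_inj.mp
  have hA : format_case text "upper"
      = PySem.Str.join " " ((PySem.Str.split₀ text).map PySem.Str.upper) := rfl
  have hB : format_case_alt text "upper"
      = String.ofList (fcScan [' '] (fcPiece "upper") text.toList false 0 0) := rfl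
  rw [hA, hB, fc_scan_join "upper" [' '] (fun t => t.map PySem.Chars.upperChar)
      (fun w t => fcEmitWord_const _ w _ (fun j c => rfl) t 0)]
  simp [PySem.Str.join, PySem.Str.split₀, List.map_map]
  congr 1
  refine List.map_congr_left (fun t _ => ?_)
  simp [Function.comp, PySem.Chars.upper]

theorem pv_case_lower (text : String) :
    format_case text "lower" = format_case_alt text "lower" := by
  apply String.toList_inj.mp
  have hA : format_case text "lower"
      = PySem.Str.join " " ((PySem.Str.split₀ text).map PySem.Str.lower) := rfl
  have hB : format_case_alt text "lower"
      = String.ofList (fcScan [' '] (fcPiece "lower") text.toList false 0 0) := rfl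
  rw [hA, hB, fc_scan_join "lower" [' '] (fun t => t.map PySem.Chars.lowerChar)
      (fun w t => fcEmitWord_const _ w _ (fun j c => rfl) t 0)]
  simp [PySem.Str.join, PySem.Str.split₀, List.map_map]
  congr 1
  refine List.map_congr_left (fun t _ => ?_)
  simp [Function.comp, PySem.Chars.lower]

theorem fc_cap_emit (case : String) (w : Nat)
    (h0 : ∀ c, fcPiece case w 0 c = [PySem.Chars.upperChar c])
    (hl : ∀ j c, 0 < j → fcPiece case w j c = [PySem.Chars.lowerChar c]) (t : List Char) :
    fcEmitWord (fcPiece case) w 0 t = pvCapChars t :=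
  fcEmitWord_cap _ w h0 hl t

theorem pv_case_title (text : String) :
    format_case text "title" = format_case_alt text "title" := by
  apply String.toList_inj.mp
  have hA : format_case text "title"
      = PySem.Str.join " " ((PySem.Str.split₀ text).map pyCapitalize) := rfl
  have hB : format_case_alt text "title"
      = String.ofList (fcScan [' '] (fcPiece "title") text.toList false 0 0) := rfl
  rw [hA, hB, fc_scan_join "title" [' '] pvCapChars
      (fun w t => fc_cap_emit "title" w (fun c => rfl)
        (fun j c hj => by simp [fcPiece, fc_pos_beq_false hj]) t)]
  simp [PySem.Str.join, PySem.Str.split₀, List.map_map]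
  congr 1
  refine List.map_congr_left (fun t _ => ?_)
  simp [Function.comp, pyCapitalize]

theorem pv_case_pascal (text : String) :
    format_case text "pascal" = format_case_alt text "pascal" := by
  apply String.toList_inj.mp
  have hA : format_case text "pascal"
      = PySem.Str.join "" ((PySem.Str.split₀ text).map pyCapitalize) := rfl
  have hB : format_case_alt text "pascal"
      = String.ofList (fcScan [] (fcPiece "pascal") text.toList false 0 0) := rfl
  rw [hA, hB, fc_scan_join "pascal" [] pvCapChars
      (fun w t => fc_cap_emit "pascal" w (fun c => rfl)
        (fun j c hj => by simp [fcPiece, fc_pos_beq_false hj]) t)]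
  simp [PySem.Str.join, PySem.Str.split₀, List.map_map]
  congr 1
  refine List.map_congr_left (fun t _ => ?_)
  simp [Function.comp, pyCapitalize]

theorem pv_case_snake (text : String) :
    format_case text "snake" = format_case_alt text "snake" := by
  apply String.toList_inj.mp
  have hA : format_case text "snake"
      = PySem.Str.join "_" (PySem.Str.split₀ text) := rfl
  have hB : format_case_alt text "snake"
      = String.ofList (fcScan ['_'] (fcPiece "snake") text.toList false 0 0) := rfl
  rw [hA, hB, fc_scan_join "snake" ['_'] (fun t => t)
      (fun w t => by
        simpa using fcEmitWord_const (fcPiece "snake") w id (fun j c => rfl) t 0)]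
  simp [PySem.Str.join, PySem.Str.split₀, List.map_map]
  congr 1
  simp [Function.comp_def]

theorem pv_case_screaming_snake (text : String) :
    format_case text "screaming snake" = format_case_alt text "screaming snake" := by
  apply String.toList_inj.mp
  have hA : format_case text "screaming snake"
      = PySem.Str.join "_" ((PySem.Str.split₀ text).map PySem.Str.upper) := rfl
  have hB : format_case_alt text "screaming snake"
      = String.ofList (fcScan ['_'] (fcPiece "screaming snake") text.toList false 0 0) := rfl
  rw [hA, hB, fc_scan_join "screaming snake" ['_'] (fun t => t.map PySem.Chars.upperChar)
      (fun w t => fcEmitWord_const _ w _ (fun j c => rfl) t 0)]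
  simp [PySem.Str.join, PySem.Str.split₀, List.map_map]
  congr 1
  refine List.map_congr_left (fun t _ => ?_)
  simp [Function.comp, PySem.Chars.upper]

-- first-letter extraction, per word
def fcAcr : List Char → List Char
  | [] => []
  | c :: _ => [PySem.Chars.upperChar c]

theorem fc_acr_emit (w : Nat) (t : List Char) :
    fcEmitWord (fcPiece "acronym") w 0 t = fcAcr t := by
  cases t with
  | nil => simp [fcEmitWord, fcAcr]
  | cons c cs =>
    have : fcEmitWord (fcPiece "acronym") w 1 cs = [] :=
      fcEmitWord_skip _ w (fun j c hj => by simp [fcPiece, fc_pos_beq_false hj]) cs 1 (by omega)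
    simp [fcEmitWord, fcAcr, this, fcPiece]

theorem pv_case_acronym (text : String) :
    format_case text "acronym" = format_case_alt text "acronym" := by
  apply String.toList_inj.mp
  have hA : format_case text "acronym"
      = PySem.Str.join "" ((PySem.Str.split₀ text).map pyFirstUpper) := rfl
  have hB : format_case_alt text "acronym"
      = String.ofList (fcScan [] (fcPiece "acronym") text.toList false 0 0) := rfl
  rw [hA, hB, fc_scan_join "acronym" [] fcAcr (fun w t => fc_acr_emit w t)]
  simp [PySem.Str.join, PySem.Str.split₀, List.map_map]
  congr 1
  refine List.map_congr_left (fun t _ => ?_)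
  cases t with
  | nil => simp [Function.comp, pyFirstUpper, PySem.List.pyGet?, PySem.List.pyIdx?, fcAcr]
  | cons c cs => simp [Function.comp, pyFirstUpper, PySem.List.pyGet?, PySem.List.pyIdx?, fcAcr]

theorem pv_case_camel (text : String) (htok : PySem.Str.split₀ text ≠ []) :
    format_case text "camel" = format_case_alt text "camel" := by
  have hlist : PySem.Chars.split₀ text.toList ≠ [] := by
    intro h; apply htok; simp [PySem.Str.split₀, h]
  obtain ⟨t0, ts, hws⟩ : ∃ t0 ts, PySem.Chars.split₀ text.toList = t0 :: ts := by
    cases h : PySem.Chars.split₀ text.toList with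
    | nil => exact absurd h hlist
    | cons a b => exact ⟨a, b, rfl⟩
  have hstok : PySem.Str.split₀ text = String.ofList t0 :: ts.map String.ofList := by
    simp [PySem.Str.split₀, hws]
  have hA : format_case text "camel"
      = PySem.Str.join "" (PySem.Str.lower (String.ofList t0) ::
          (ts.map String.ofList).map pyCapitalize) := by
    show (match PySem.List.pyGet? (PySem.Str.split₀ text) 0 with
      | some t0' => PySem.Str.join ""
          (PySem.Str.lower t0' ::
            (PySem.List.slice (PySem.Str.split₀ text) (some 1) none).map pyCapitalize)
      | none => "") = _
    rw [hstok, PySem.List.slice_from _ (by omega)]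
    simp [PySem.List.pyGet?, PySem.List.pyIdx?]
  have hwords : fcWords text.toList = t0 :: ts := by rw [← fc_split₀_eq_fcWords, hws]
  have hB : format_case_alt text "camel"
      = String.ofList (fcScan [] (fcPiece "camel") text.toList false 0 0) := rfl
  have hBlist : fcScan [] (fcPiece "camel") text.toList false 0 0
      = t0.map PySem.Chars.lowerChar ++ (ts.map pvCapChars).flatten := by
    rw [(fcScan_spec [] (fcPiece "camel") text.toList).1 0 0, hwords]
    simp only [fcEmitWords]
    rw [if_neg (by omega), fcEmitWord_const (fcPiece "camel") 0 PySem.Chars.lowerChar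
          (fun j c => rfl) t0 0,
        fcEmitWords_pos [] _ pvCapChars
          (fun w t hw => fc_cap_emit "camel" w
            (fun c => by simp [fcPiece, fc_pos_beq_false hw])
            (fun j c hj => by simp [fcPiece, fc_pos_beq_false hw, fc_pos_beq_false hj]) t)
          ts 1 (by omega)]
    simp [List.flatMap]
  apply String.toList_inj.mp
  rw [hA, hB, hBlist]
  simp [PySem.Str.join, List.map_map, fc_join_nil_flatten, PySem.Chars.lower]
  congr 1
  refine List.map_congr_left (fun t _ => ?_)
  simp [Function.comp, pyCapitalize]

theorem pv_case_letters_emit_const (case : String) (g : Char → Char)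
    (h : ∀ w j c, fcPiece case w j c = [g c]) (ws : List (List Char)) :
    fcEmitWords [] (fcPiece case) 0 ws = ws.flatten.map g := by
  rw [fcEmitWords_zero [] _ (fun t => t.map g) (fun w t => fcEmitWord_const _ w g (h w) t 0),
      fc_join_nil_flatten]
  simp [List.map_flatten]

-- ===== VERDICT (by name: the statement is the Claim_ definition above) =====

theorem fc_join_toList (text : String) :
    (PySem.Str.join "" (PySem.Str.split₀ text)).toList = (fcWords text.toList).flatten := by
  simp [PySem.Str.join, PySem.Str.split₀, List.map_map]
  rw [show List.map (String.toList ∘ String.ofList) (PySem.Chars.split₀ text.toList)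
        = PySem.Chars.split₀ text.toList by simp [Function.comp_def],
      fc_join_nil_flatten, fc_split₀_eq_fcWords]

theorem fc_rep_toList (text : String) :
    (PySem.Str.replace (PySem.Str.join "" (PySem.Str.split₀ text)) " " "").toList
      = (fcWords text.toList).flatten := by
  have h : (PySem.Str.replace (PySem.Str.join "" (PySem.Str.split₀ text)) " " "").toList
      = PySem.Chars.replace ((fcWords text.toList).flatten) [' '] [] := by
    simp [fc_join_toList text]
  rw [h, fc_replace_noop _ (fc_flatten_no_space _)]

theorem pv_case_lower_letters (text : String) :
    format_case text "lower letters" = format_case_alt text "lower letters" := by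
  apply String.toList_inj.mp
  have hA : format_case text "lower letters"
      = PySem.Str.lower (PySem.Str.replace (PySem.Str.join "" (PySem.Str.split₀ text)) " " "") := rfl
  have hB : format_case_alt text "lower letters"
      = String.ofList (fcScan [] (fcPiece "lower letters") text.toList false 0 0) := rfl
  rw [hA, hB, (fcScan_spec [] (fcPiece "lower letters") text.toList).1 0 0,
      pv_case_letters_emit_const "lower letters" PySem.Chars.lowerChar (fun w j c => rfl)]
  simp [fc_rep_toList text, PySem.Chars.lower]

theorem pv_case_upper_letters (text : String) :
    format_case text "upper letters" = format_case_alt text "upper letters" := by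
  apply String.toList_inj.mp
  have hA : format_case text "upper letters"
      = PySem.Str.upper (PySem.Str.replace (PySem.Str.join "" (PySem.Str.split₀ text)) " " "") := rfl
  have hB : format_case_alt text "upper letters"
      = String.ofList (fcScan [] (fcPiece "upper letters") text.toList false 0 0) := rfl
  rw [hA, hB, (fcScan_spec [] (fcPiece "upper letters") text.toList).1 0 0,
      pv_case_letters_emit_const "upper letters" PySem.Chars.upperChar (fun w j c => rfl)]
  simp [fc_rep_toList text, PySem.Chars.upper]

theorem fc_name_emit (ws : List (List Char)) (hne : ∀ t ∈ ws, t ≠ []) :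
    fcEmitWords [] (fcPiece "name letters") 0 ws = pvCapChars ws.flatten := by
  cases ws with
  | nil => simp [fcEmitWords, pvCapChars]
  | cons t0 ts =>
    obtain ⟨c, t', rfl⟩ : ∃ c t', t0 = c :: t' := by
      cases t0 with
      | nil => exact absurd rfl (hne [] (by simp))
      | cons a b => exact ⟨a, b, rfl⟩
    simp only [fcEmitWords]
    rw [if_neg (by omega),
        fc_cap_emit "name letters" 0 (fun c => rfl)
          (fun j c hj => by simp [fcPiece, fc_pos_beq_false hj]) (c :: t'),
        fcEmitWords_pos [] _ (fun t => t.map PySem.Chars.lowerChar)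
          (fun w t hw => fcEmitWord_const _ w _
            (fun j c => by simp [fcPiece, fc_pos_beq_false hw]) t 0) ts 1 (by omega)]
    simp [pvCapChars, PySem.Chars.lower, List.map_flatten, List.flatMap]

theorem pv_case_name_letters (text : String) :
    format_case text "name letters" = format_case_alt text "name letters" := by
  apply String.toList_inj.mp
  have hA : format_case text "name letters"
      = pyCapitalize (PySem.Str.replace (PySem.Str.join "" (PySem.Str.split₀ text)) " " "") := rfl
  have hB : format_case_alt text "name letters"
      = String.ofList (fcScan [] (fcPiece "name letters") text.toList false 0 0) := rfl
  rw [hA, hB, (fcScan_spec [] (fcPiece "name letters") text.toList).1 0 0,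
      fc_name_emit (fcWords text.toList) (fcWords_ne_nil text.toList)]
  simp [pyCapitalize, fc_rep_toList text]

theorem format_case_spec : Claim_equal_format_case := by
  intro text case _ hpre
  obtain ⟨hmem, hcam⟩ := hpre
  unfold Spec_format_case
  simp only [List.mem_cons, List.not_mem_nil, or_false] at hmem
  rcases hmem with rfl | rfl | rfl | rfl | rfl | rfl | rfl | rfl | rfl | rfl | rfl
  exacts [pv_case_upper text, pv_case_lower text, pv_case_title text, pv_case_pascal text,
    pv_case_snake text, pv_case_screaming_snake text, pv_case_camel text (hcam rfl),
    pv_case_acronym text, pv_case_lower_letters text, pv_case_upper_letters text,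
    pv_case_name_letters text]

def format_case_raises : Claim_raises_format_case := by
  unfold Claim_raises_format_case
  constructor
  · rintro text case _ ⟨hc, he⟩ ⟨_, hcam⟩
    exact (hcam hc) he
  · exact ⟨by decide, by decide, by decide⟩
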